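-- pv_equiv track=rewrite | github.com/zhjpqq/scalenet | xtils.py | get_xfc_which
-- ===== SOURCE A (Python) =====
-- def get_xfc_which(it, xfc_which):
--     """
--      - it: 当前迭代次数
--      - xfc_which: {0 * BN: -1, 20 * BN: -2, 30 * BN: -3}
--     """
--     if isinstance(xfc_which, int):
--         return xfc_which
--     elif isinstance(xfc_which, str):
--         return xfc_which
--     elif isinstance(xfc_which, dict):
--         which = None
--         for ite in sorted(xfc_which.keys())[::-1]:
--             if it >= ite:
--                 which = xfc_which[ite]
--                 break
--         if which is None:
--             raise NotImplementedError
--         return which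
--     else:
--         raise NotImplementedError
-- ===== SOURCE B (Python) =====
-- def get_xfc_which(it, xfc_which):
--     if isinstance(xfc_which, int):
--         return xfc_which
--     elif isinstance(xfc_which, str):
--         return xfc_which
--     elif isinstance(xfc_which, dict):
--         which = max((k for k in xfc_which if it >= k), default=None)
--         if which is None:
--             raise NotImplementedError
--         return xfc_which[which]
--     else:
--         raise NotImplementedError
-- ===== Notes on version B (the rewrite author's own statement) =====
-- stated objective: faster
-- what changed: Replaces the descending sort plus early-break scan with a single linear max over the keys not exceeding it, then one dict lookup.
import Mathlib
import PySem

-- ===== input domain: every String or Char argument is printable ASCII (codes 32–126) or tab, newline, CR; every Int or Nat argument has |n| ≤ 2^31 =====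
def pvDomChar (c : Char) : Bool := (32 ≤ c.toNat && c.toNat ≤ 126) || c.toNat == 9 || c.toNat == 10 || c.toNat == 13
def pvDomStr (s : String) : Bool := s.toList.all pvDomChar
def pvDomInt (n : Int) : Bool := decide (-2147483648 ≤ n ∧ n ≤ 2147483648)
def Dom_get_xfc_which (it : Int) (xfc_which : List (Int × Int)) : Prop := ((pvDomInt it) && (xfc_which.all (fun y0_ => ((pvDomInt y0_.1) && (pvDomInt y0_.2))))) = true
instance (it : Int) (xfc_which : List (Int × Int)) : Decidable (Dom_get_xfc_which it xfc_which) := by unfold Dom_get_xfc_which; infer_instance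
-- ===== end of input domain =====

-- B replaces A's sort-descending-and-break scan by one linear max over the keys ≤ it (objective: faster — one O(n) max pass instead of the O(n log n) sort).

-- ===== PORT A =====
-- the for-loop over sorted(keys)[::-1] with the break: returns the value at the first key ≤ it
def pvScanA (it : Int) (d : PySem.Dict Int Int) : List Int → Option Int
  | [] => none
  | k :: rest => if it ≥ k then some (d.getD k 0) else pvScanA it d rest
  -- d.getD k 0: the lookup xfc_which[ite]; k is always a key of d, so the default 0 is never used

def get_xfc_which (it : Int) (xfc_which : List (Int × Int)) : Int :=
  -- sorted(xfc_which.keys())[::-1]; step -1 is never 0, so slice? is always some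
  -- 'if which is None: raise NotImplementedError' — excluded by Pre_, so the outer .getD 0 is never used
  (pvScanA it (PySem.Dict.mk xfc_which)
    ((PySem.List.slice? (PySem.List.sorted (PySem.Dict.mk xfc_which).keys (fun k => k) false)
        none none (-1)).getD [])).getD 0

-- ===== PORT B =====
def get_xfc_which_alt (it : Int) (xfc_which : List (Int × Int)) : Int :=
  -- which = max((k for k in xfc_which if it >= k), default=None)
  match PySem.List.max? ((PySem.Dict.mk xfc_which).keys.filter (fun k => it ≥ k)) (fun k => k) with
  | some which => (PySem.Dict.mk xfc_which).getD which 0   -- return xfc_which[which]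
  | none => 0                      -- 'raise NotImplementedError' — excluded by Pre_

-- ===== PRECONDITION & SPEC =====
-- Pre_ excludes exactly the inputs where no key is ≤ it (including the empty dict): there A raises NotImplementedError.
def Pre_get_xfc_which (it : Int) (xfc_which : List (Int × Int)) : Prop :=
  ∃ p ∈ xfc_which, p.1 ≤ it
instance (it : Int) (xfc_which : List (Int × Int)) : Decidable (Pre_get_xfc_which it xfc_which) := by unfold Pre_get_xfc_which; infer_instance

def pvWitness_get_xfc_which : Int × (List (Int × Int)) := (25, [(0, -1), (20, -2), (30, -3)])

def Spec_get_xfc_which (it : Int) (xfc_which : List (Int × Int)) (out : Int) : Prop := out = get_xfc_which_alt it xfc_which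
instance (it : Int) (xfc_which : List (Int × Int)) (out : Int) : Decidable (Spec_get_xfc_which it xfc_which out) := by unfold Spec_get_xfc_which; infer_instance

-- ===== CLAIM (what is proved, stated in full; the proofs are below) =====
def Claim_equal_get_xfc_which : Prop := ∀ (it : Int) (xfc_which : List (Int × Int)), Dom_get_xfc_which it xfc_which → Pre_get_xfc_which it xfc_which → Spec_get_xfc_which it xfc_which (get_xfc_which it xfc_which)

-- ===== LEMMAS AND PROOFS =====

-- with the identity key, max? is the (unique) maximum value: stable under permutation
theorem max?_id_perm (l l' : List Int) (h : l.Perm l') :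
    PySem.List.max? l (fun k => k) = PySem.List.max? l' (fun k => k) := by
  rcases hl : PySem.List.max? l (fun k : Int => k) with _ | m <;>
    rcases hl' : PySem.List.max? l' (fun k : Int => k) with _ | m'
  · rfl
  · rw [PySem.List.max?_eq_none_iff] at hl
    subst hl
    have : l' = [] := List.perm_nil.mp h.symm
    subst this
    simp [PySem.List.max?] at hl'
  · rw [PySem.List.max?_eq_none_iff] at hl'
    subst hl'
    have : l = [] := List.perm_nil.mp h
    subst this
    simp [PySem.List.max?] at hl
  · have hm := PySem.List.max?_mem hl
    have hm' := PySem.List.max?_mem hl'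
    have h1 := PySem.List.max?_isMax hl' m (h.mem_iff.mp hm)
    have h2 := PySem.List.max?_isMax hl m' (h.mem_iff.mpr hm')
    simp at h1 h2 ⊢
    omega

-- a left fold of max over elements all ≤ the seed keeps the seed
theorem foldl_max_of_le (k : Int) :
    ∀ t : List Int, (∀ y ∈ t, y ≤ k) → t.foldl max k = k := by
  intro t
  induction t with
  | nil => intro _; rfl
  | cons a t ih =>
    intro hle
    simp only [List.foldl_cons, max_eq_left (hle a (by simp))]
    exact ih fun y hy => hle y (by simp [hy])

-- the descending early-break scan equals max-of-the-filtered-keys, then lookup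
theorem scanA_eq_max (it : Int) (d : PySem.Dict Int Int) :
    ∀ (l : List Int), l.Pairwise (fun a b => b ≤ a) →
      pvScanA it d l =
        (PySem.List.max? (l.filter (fun k => it ≥ k)) (fun k => k)).map (fun k => d.getD k 0) := by
  intro l
  induction l with
  | nil => intro _; simp [pvScanA, PySem.List.max?]
  | cons k rest ih =>
    intro hp
    rw [List.pairwise_cons] at hp
    by_cases hk : k ≤ it
    · have hfilter : (k :: rest).filter (fun x => it ≥ x) = k :: rest.filter (fun x => it ≥ x) := by
        simp [hk]
      rw [hfilter, PySem.List.max?_id_cons]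
      rw [foldl_max_of_le k _ (fun y hy => hp.1 y (List.mem_of_mem_filter hy))]
      simp [pvScanA, hk]
    · have hfilter : (k :: rest).filter (fun x => it ≥ x) = rest.filter (fun x => it ≥ x) := by
        simp [hk]
      rw [hfilter, ← ih hp.2]
      simp [pvScanA, hk]

-- ===== VERDICT (by name: the statement is the Claim_ definition above) =====
theorem get_xfc_which_spec : Claim_equal_get_xfc_which := by
  intro it xs _ hpre
  unfold Spec_get_xfc_which get_xfc_which get_xfc_which_alt
  rw [PySem.List.slice?_none_none_neg_one]
  simp only [Option.getD_some]
  have hpair : ((PySem.List.sorted (PySem.Dict.mk xs).keys (fun k => k) false).reverse).Pairwise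
      (fun a b : Int => b ≤ a) := by
    rw [List.pairwise_reverse]
    exact PySem.List.sorted_pairwise (PySem.Dict.mk xs).keys (fun k => k)
  rw [scanA_eq_max it (PySem.Dict.mk xs) _ hpair]
  have hperm : (((PySem.List.sorted (PySem.Dict.mk xs).keys (fun k => k) false).reverse).filter
      (fun k => it ≥ k)).Perm ((PySem.Dict.mk xs).keys.filter (fun k => it ≥ k)) := by
    exact ((List.reverse_perm _).trans
      (PySem.List.sorted_perm (PySem.Dict.mk xs).keys (fun k => k) false)).filter _
  rw [max?_id_perm _ _ hperm]
  -- Pre_ makes the filtered key list nonempty, so max? is some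
  obtain ⟨p, hp, hple⟩ := hpre
  have hk : p.1 ∈ (PySem.Dict.mk xs).keys.filter (fun k => it ≥ k) := by
    rw [List.mem_filter]
    refine ⟨?_, by simpa using hple⟩
    simp only [PySem.Dict.keys]
    exact List.mem_map_of_mem hp
  rcases hmax : PySem.List.max? ((PySem.Dict.mk xs).keys.filter (fun k => it ≥ k))
      (fun k : Int => k) with _ | m
  · rw [PySem.List.max?_eq_none_iff] at hmax
    rw [hmax] at hk
    simp at hk
  · simp
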